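-- pv_equiv track=rewrite | github.com/Zeed80/ai-docs | backend/app/auth/__init__.py | permissions_for_roles
-- ===== SOURCE A (Python) =====
-- ROLE_PERMISSIONS: dict[str, set[str]] = {
--     "admin": {"*"},
--     "manager": {
--         "agent:read",
--         "agent:run",
--         "approval:decide",
--         "document:read",
--         "document:write",
--         "invoice:approve",
--         "invoice:export",
--         "invoice:read",
--     },
--     "technologist": {
--         "agent:read",
--         "agent:run",
--         "case:read",
--         "case:write",
--         "document:read",
--         "document:write",
--         "drawing:analyze",
--         "email:draft",
--     },
--     "accountant": {
--         "case:read",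
--         "document:read",
--         "email:draft",
--         "invoice:export",
--         "invoice:read",
--     },
--     "buyer": {
--         "document:read",
--         "email:draft",
--         "email:read",
--         "supplier:read",
--     },
--     "viewer": {
--         "document:read",
--         "invoice:read",
--         "supplier:read",
--     },
-- }
--
-- def permissions_for_roles(roles: list[str]) -> list[str]:
--     permissions: set[str] = set()
--     for role in roles:
--         role_permissions = ROLE_PERMISSIONS.get(role, set())
--         if "*" in role_permissions:
--             return ["*"]
--         permissions.update(role_permissions)
--     return sorted(permissions)
-- ===== SOURCE B (Python) =====
-- ROLE_PERMISSIONS: dict[str, set[str]] = {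
--     "admin": {"*"},
--     "manager": {
--         "agent:read",
--         "agent:run",
--         "approval:decide",
--         "document:read",
--         "document:write",
--         "invoice:approve",
--         "invoice:export",
--         "invoice:read",
--     },
--     "technologist": {
--         "agent:read",
--         "agent:run",
--         "case:read",
--         "case:write",
--         "document:read",
--         "document:write",
--         "drawing:analyze",
--         "email:draft",
--     },
--     "accountant": {
--         "case:read",
--         "document:read",
--         "email:draft",
--         "invoice:export",
--         "invoice:read",
--     },
--     "buyer": {
--         "document:read",
--         "email:draft",
--         "email:read",
--         "supplier:read",
--     },
--     "viewer": {
--         "document:read",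
--         "invoice:read",
--         "supplier:read",
--     },
-- }
--
-- # Inverted index, precomputed once at module load:
-- # the fixed catalogue of concrete permissions, already sorted, and for each
-- # permission the set of roles that grant it.
-- _PERM_CATALOG: list[str] = sorted(
--     {p for s in ROLE_PERMISSIONS.values() for p in s if p != "*"}
-- )
-- _GRANTED_BY: dict[str, set[str]] = {
--     p: {r for r, s in ROLE_PERMISSIONS.items() if p in s} for p in _PERM_CATALOG
-- }
--
--
-- def permissions_for_roles(roles: list[str]) -> list[str]:
--     # "admin" is the only role holding the wildcard.
--     if "admin" in roles:
--         return ["*"]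
--     role_set = set(roles)
--     return [p for p in _PERM_CATALOG if _GRANTED_BY[p] & role_set]
-- ===== Notes on version B (the rewrite author's own statement) =====
-- stated objective: alternative
-- what changed: Replaces A's per-call accumulate-a-set-then-sort loop with a precomputed inverted index: a fixed, already-sorted permission catalogue is filtered by 'some given role grants it' (via a permission->roles map), and the wildcard short-circuit becomes a membership test for 'admin', the only role holding '*'; no per-call union or sort.
import Mathlib
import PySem

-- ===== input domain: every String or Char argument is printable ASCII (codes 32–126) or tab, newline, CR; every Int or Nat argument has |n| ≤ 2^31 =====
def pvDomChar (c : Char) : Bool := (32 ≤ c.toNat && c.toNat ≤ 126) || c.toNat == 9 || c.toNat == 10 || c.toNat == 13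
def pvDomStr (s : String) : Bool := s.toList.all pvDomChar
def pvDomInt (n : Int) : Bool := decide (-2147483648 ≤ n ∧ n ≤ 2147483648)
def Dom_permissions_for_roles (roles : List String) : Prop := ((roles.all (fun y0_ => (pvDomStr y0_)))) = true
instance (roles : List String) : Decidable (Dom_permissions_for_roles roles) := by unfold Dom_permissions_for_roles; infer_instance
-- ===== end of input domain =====

-- B replaces A's accumulate-then-sort loop by a precomputed inverted index: a fixed,
-- already-sorted permission catalogue filtered by "some given role grants it", with the
-- wildcard reduced to a membership test for "admin"; objective: alternative (no per-call union or sort).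

-- ===== PORT A =====
-- ROLE_PERMISSIONS.get(role, set()): module-level constant dict, shared by both Pythons.
def rolePermissions (role : String) : PySem.Set String :=
  if role = "admin" then ["*"]
  else if role = "manager" then
    ["agent:read", "agent:run", "approval:decide", "document:read",
     "document:write", "invoice:approve", "invoice:export", "invoice:read"]
  else if role = "technologist" then
    ["agent:read", "agent:run", "case:read", "case:write",
     "document:read", "document:write", "drawing:analyze", "email:draft"]
  else if role = "accountant" then
    ["case:read", "document:read", "email:draft", "invoice:export", "invoice:read"]
  else if role = "buyer" then
    ["document:read", "email:draft", "email:read", "supplier:read"]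
  else if role = "viewer" then
    ["document:read", "invoice:read", "supplier:read"]
  else PySem.Set.empty

-- the 'for role in roles' loop with its early return and set accumulator
def permLoopA : List String → PySem.Set String → List String
  | [], permissions => PySem.List.sorted permissions (fun x => x) false
  | role :: rest, permissions =>
    let role_permissions := rolePermissions role
    if PySem.Set.contains role_permissions "*" then ["*"]
    else permLoopA rest (PySem.Set.update permissions role_permissions)

def permissions_for_roles (roles : List String) : List String :=
  permLoopA roles PySem.Set.empty

-- ===== PORT B =====
-- the keys of ROLE_PERMISSIONS, in insertion order
def roleNames : List String :=
  ["admin", "manager", "technologist", "accountant", "buyer", "viewer"]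

-- _PERM_CATALOG = sorted({p for s in ROLE_PERMISSIONS.values() for p in s if p != "*"})
def permCatalog : List String :=
  PySem.List.sorted
    (PySem.Set.ofList ((roleNames.flatMap (fun r => rolePermissions r)).filter (fun p => p ≠ "*")))
    (fun x => x) false

-- _GRANTED_BY[p] = {r for r, s in ROLE_PERMISSIONS.items() if p in s}
def grantedBy (p : String) : PySem.Set String :=
  PySem.Set.ofList (roleNames.filter (fun r => PySem.Set.contains (rolePermissions r) p))

def permissions_for_roles_alt (roles : List String) : List String :=
  if roles.contains "admin" then ["*"]
  else
    let role_set := PySem.Set.ofList roles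
    permCatalog.filter (fun p => PySem.Set.inter (grantedBy p) role_set ≠ [])

-- ===== PRECONDITION & SPEC =====
def Spec_permissions_for_roles (roles : List String) (out : List String) : Prop := out = permissions_for_roles_alt roles
instance (roles : List String) (out : List String) : Decidable (Spec_permissions_for_roles roles out) := by unfold Spec_permissions_for_roles; infer_instance

-- ===== CLAIM (what is proved, stated in full; the proofs are below) =====
def Claim_equal_permissions_for_roles : Prop := ∀ (roles : List String), Dom_permissions_for_roles roles → Spec_permissions_for_roles roles (permissions_for_roles roles)

-- ===== LEMMAS AND PROOFS =====

-- only "admin"'s set holds the wildcard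
theorem contains_star (r : String) :
    PySem.Set.contains (rolePermissions r) "*" = (r = "admin" : Bool) := by
  unfold rolePermissions
  split_ifs with h1 h2 h3 h4 h5 h6 <;> simp_all

-- A's loop, for any accumulator: wildcard scan, else sorted union
theorem permLoopA_eq (roles : List String) (acc : PySem.Set String) :
    permLoopA roles acc =
      if "admin" ∈ roles then ["*"]
      else PySem.List.sorted ((roles.map rolePermissions).foldl PySem.Set.union acc)
             (fun x => x) false := by
  induction roles generalizing acc with
  | nil => simp [permLoopA]
  | cons role rest ih =>
    simp only [permLoopA, contains_star, List.mem_cons, List.map_cons, List.foldl_cons, ih,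
      PySem.Set.union]
    by_cases h : role = "admin" <;> simp [h, eq_comm]

-- membership in the folded union
theorem mem_foldl_union (l : List (PySem.Set String)) (acc : PySem.Set String) (p : String) :
    p ∈ l.foldl PySem.Set.union acc ↔ p ∈ acc ∨ ∃ s ∈ l, p ∈ s := by
  induction l generalizing acc with
  | nil => simp
  | cons s t ih =>
    simp [ih, PySem.Set.mem_union]
    tauto

-- the folded union keeps Nodup
theorem nodup_foldl_union (l : List (PySem.Set String)) (acc : PySem.Set String)
    (h : acc.Nodup) : (l.foldl PySem.Set.union acc).Nodup := by
  induction l generalizing acc with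
  | nil => exact h
  | cons s t ih => exact ih _ (PySem.Set.nodup_union _ _ h)

-- what the catalogue contains: every non-wildcard permission of some known role
theorem mem_permCatalog (p : String) :
    p ∈ permCatalog ↔ p ≠ "*" ∧ ∃ r ∈ roleNames, p ∈ rolePermissions r := by
  unfold permCatalog
  rw [PySem.List.mem_sorted, PySem.Set.mem_ofList]
  simp [List.mem_filter, List.mem_flatMap, and_comm]

-- the catalogue is strictly sorted (hence Nodup)
theorem permCatalog_pairwise : permCatalog.Pairwise (· < ·) :=
  PySem.List.sorted_ofList_pairwise_lt _

theorem permCatalog_nodup : permCatalog.Nodup :=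
  permCatalog_pairwise.imp ne_of_lt

-- a non-admin role's permissions lie in the catalogue, and a granting role is a known role
theorem perm_mem_catalog (r p : String) (hr : r ≠ "admin") (h : p ∈ rolePermissions r) :
    p ∈ permCatalog ∧ r ∈ roleNames := by
  have hrn : r ∈ roleNames ∧ p ≠ "*" := by
    unfold rolePermissions at h
    split_ifs at h with h1 h2 h3 h4 h5 h6 <;>
      first
        | (exact absurd h1 hr)
        | (simp only [List.mem_cons, List.not_mem_nil, or_false] at h
           subst_vars
           rcases h with rfl | rfl | rfl | rfl | rfl | rfl | rfl | rfl <;> exact ⟨by decide, by decide⟩)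
        | simp [PySem.Set.empty] at h
  exact ⟨(mem_permCatalog p).mpr ⟨hrn.2, r, hrn.1, h⟩, hrn.1⟩

-- membership in B's filtered catalogue
theorem mem_alt_filter (roles : List String) (p : String) :
    (p ∈ permCatalog.filter
        (fun p => PySem.Set.inter (grantedBy p) (PySem.Set.ofList roles) ≠ [])) ↔
      p ∈ permCatalog ∧ ∃ r ∈ roleNames, p ∈ rolePermissions r ∧ r ∈ roles := by
  simp only [List.mem_filter, decide_eq_true_eq, ← List.isEmpty_eq_false_iff,
    List.isEmpty_eq_false_iff_exists_mem, PySem.Set.mem_inter, grantedBy,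
    PySem.Set.mem_ofList, List.mem_filter, List.contains_iff_mem, decide_eq_true_eq,
    PySem.Set.contains_eq_listContains]
  tauto

-- ===== VERDICT (by name: the statement is the Claim_ definition above) =====
theorem permissions_for_roles_spec : Claim_equal_permissions_for_roles := by
  intro roles _
  unfold Spec_permissions_for_roles permissions_for_roles permissions_for_roles_alt
  rw [permLoopA_eq]
  by_cases hadm : "admin" ∈ roles
  · simp [hadm]
  · have hc : roles.contains "admin" = false := by
      simpa [List.contains_iff_mem] using hadm
    simp only [hadm, if_false, hc, Bool.false_eq_true]
    apply PySem.List.sorted_eq_of_perm_of_pairwise_lt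
    · -- permutation: both sides Nodup with equal membership
      rw [List.perm_ext_iff_of_nodup (permCatalog_nodup.filter _)
        (nodup_foldl_union _ PySem.Set.empty List.nodup_nil)]
      intro p
      rw [mem_alt_filter, mem_foldl_union]
      simp only [PySem.Set.empty, List.mem_map, List.not_mem_nil, false_or]
      constructor
      · rintro ⟨_, r, hrn, hp, hrr⟩
        exact ⟨rolePermissions r, ⟨r, hrr, rfl⟩, hp⟩
      · rintro ⟨s, ⟨r, hrr, rfl⟩, hp⟩
        have hr : r ≠ "admin" := fun h => hadm (h ▸ hrr)
        obtain ⟨hcat, hrn⟩ := perm_mem_catalog r p hr hp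
        exact ⟨hcat, r, hrn, hp, hrr⟩
    · -- the filtered catalogue is strictly increasing
      exact permCatalog_pairwise.filter _
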